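-- pv_equiv track=rewrite | github.com/Skymore/LeetCode_and_OA | Meituan_OA/meituan_20240322_2.py | solve
-- ===== SOURCE A (Python) =====
-- def solve(s):
--     ans = 0
--     length = 1
--
--     for i in range(1, len(s)):
--         if s[i] == s[i-1]:
--             length += 1
--         else:
--             if length >= 2:
--                 ans += length - 1
--             length = 1
--
--     if length >= 2:
--         ans += length - 1
--
--     return ans
-- ===== SOURCE B (Python) =====
-- def solve(s):
--     return sum(1 for a, b in zip(s, s[1:]) if a == b)
-- ===== Notes on version B (the rewrite author's own statement) =====
-- stated objective: simpler
-- what changed: Replaces A's run-length state machine (length counter, branch, boundary flush) with a stateless direct count of adjacent equal character pairs over zip(s, s[1:]).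
import Mathlib
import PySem

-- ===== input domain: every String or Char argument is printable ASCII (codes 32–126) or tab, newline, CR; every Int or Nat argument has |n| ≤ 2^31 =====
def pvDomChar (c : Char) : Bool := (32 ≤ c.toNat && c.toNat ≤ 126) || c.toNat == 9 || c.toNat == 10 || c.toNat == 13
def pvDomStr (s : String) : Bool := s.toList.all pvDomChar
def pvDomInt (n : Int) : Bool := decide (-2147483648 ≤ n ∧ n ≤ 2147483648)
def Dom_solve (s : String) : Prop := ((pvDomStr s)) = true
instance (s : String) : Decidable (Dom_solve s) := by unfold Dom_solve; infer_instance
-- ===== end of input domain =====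

-- B replaces A's run-length state machine with a stateless direct count of adjacent equal pairs (same cost, simpler).

-- ===== PORT A =====
-- A's loop over i in range(1, len(s)) compares s[i] with s[i-1]; ported as a fold over the
-- tail carrying the previous character and the state (ans, length), with the final flush.
def solveGo (prev : Char) (ans : Int) (length : Int) : List Char → Int
  | [] => if length ≥ 2 then ans + (length - 1) else ans
  | c :: rest =>
      if c == prev then solveGo c ans (length + 1) rest
      else solveGo c (if length ≥ 2 then ans + (length - 1) else ans) 1 rest

def solve (s : String) : Int :=
  match s.toList with
  | [] => 0
  | c :: rest => solveGo c 0 1 rest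

-- ===== PORT B =====
def solve_alt (s : String) : Int :=
  ((s.toList.zip s.toList.tail).countP (fun p => p.1 == p.2) : Nat)

-- ===== PRECONDITION & SPEC =====
def Spec_solve (s : String) (out : Int) : Prop := out = solve_alt s
instance (s : String) (out : Int) : Decidable (Spec_solve s out) := by unfold Spec_solve; infer_instance

-- ===== CLAIM (what is proved, stated in full; the proofs are below) =====
def Claim_equal_solve : Prop := ∀ (s : String), Dom_solve s → Spec_solve s (solve s)

-- ===== LEMMAS AND PROOFS =====

-- pair count of a list, as B computes it
def pairs (l : List Char) : Int := ((l.zip l.tail).countP (fun p => p.1 == p.2) : Nat)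

lemma pairs_cons (a b : Char) (t : List Char) :
    pairs (a :: b :: t) = (if b == a then 1 else 0) + pairs (b :: t) := by
  simp [pairs, List.countP_cons, BEq.comm]
  split_ifs <;> push_cast <;> ring

lemma solveGo_eq (rest : List Char) : ∀ (prev : Char) (ans length : Int), 1 ≤ length →
    solveGo prev ans length rest = ans + (length - 1) + pairs (prev :: rest) := by
  induction rest with
  | nil =>
    intro prev ans length h
    simp [solveGo, pairs]
    omega
  | cons c t ih =>
    intro prev ans length h
    rw [pairs_cons]
    simp only [solveGo]
    split_ifs with hc h2
    · rw [ih c ans (length + 1) (by omega)]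
      simp [hc]; ring
    · rw [ih c _ 1 le_rfl]; ring
    · rw [ih c _ 1 le_rfl]; omega

-- ===== VERDICT (by name: the statement is the Claim_ definition above) =====
theorem solve_spec : Claim_equal_solve := by
  intro s _
  unfold Spec_solve solve solve_alt
  cases h : s.toList with
  | nil => simp [pairs]
  | cons c rest =>
    simp only
    rw [solveGo_eq rest c 0 1 le_rfl]
    simp [pairs]
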